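-- pv_equiv track=rewrite | github.com/yhs3434/Algorithms | baekjun/pelindrom.py | solution
-- ===== SOURCE A (Python) =====
-- def solution(numbers):
--     x = int(numbers[0])
--     y = int(numbers[1])
--     count = 0
--     for num in range(x, y+1):
--         if(isPelindrom(num)==False):
--             count+=1
--     return count
--
-- def isPelindrom(num):
--     numStr = str(num)
--     numLen = len(numStr)
--     flag = False
--     for i in range(2, 4):
--         for j in range(numLen-i+1):
--             if(isSame(numStr[j:j+i])==True):
--                 flag=True
--                 break
--     return flag
--
-- def isSame(numStr):
--     flag = True
--     for i in range(len(numStr)):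
--         j = len(numStr)-i-1
--         if(i>j):
--             break
--         if(numStr[i]!=numStr[j]):
--             flag = False
--             break
--     return flag
-- ===== SOURCE B (Python) =====
-- def solution(numbers):
--     x = int(numbers[0])
--     y = int(numbers[1])
--     return sum(1 for num in range(x, y + 1) if _good(num))
--
--
-- def _good(num):
--     s = str(num)
--     return all(a != b for a, b in zip(s, s[1:])) and all(a != b for a, b in zip(s, s[2:]))
-- ===== Notes on version B (the rewrite author's own statement) =====
-- stated objective: alternative
-- what changed: A tests each number by slicing out every length-2 and length-3 substring and running a generic two-pointer palindrome check on each slice (three nested loops per number); B makes a single zip pass over the digit string comparing each character with its next and next-next neighbour, with no slicing and no palindrome routine.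
import Mathlib
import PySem

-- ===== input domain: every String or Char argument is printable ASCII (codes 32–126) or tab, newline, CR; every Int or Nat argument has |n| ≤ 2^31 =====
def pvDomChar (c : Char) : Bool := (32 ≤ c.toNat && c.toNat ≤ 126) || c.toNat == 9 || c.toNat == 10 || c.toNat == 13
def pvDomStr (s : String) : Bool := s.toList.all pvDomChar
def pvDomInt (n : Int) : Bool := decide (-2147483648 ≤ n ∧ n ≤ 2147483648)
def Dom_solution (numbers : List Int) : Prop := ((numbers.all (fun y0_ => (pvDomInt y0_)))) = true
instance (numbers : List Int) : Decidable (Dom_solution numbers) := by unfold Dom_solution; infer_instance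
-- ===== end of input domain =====

-- B replaces A's per-number triple-nested palindromic-substring scan (slice every length-2/3
-- substring and run a generic palindrome check on it) by a single zip pass comparing each digit
-- with its next and next-next neighbour; objective: alternative (same cost, different algorithm).

-- ===== PORT A =====
-- isSame(numStr): loop i over range(len) with the two breaks, comparing s[i] with s[len-i-1]
-- (both indices are always in range when read, so getD is exact here)
def isSameLoop (s : List Char) (idxs : List Nat) : Bool :=
  match idxs with
  | [] => true
  | i :: rest =>
    let j := s.length - i - 1
    if i > j then true
    else if s.getD i ' ' ≠ s.getD j ' ' then false
    else isSameLoop s rest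

def isSame (numStr : List Char) : Bool := isSameLoop numStr (List.range numStr.length)

-- inner 'for j in range(numLen-i+1): if isSame(numStr[j:j+i]): flag=True; break'
def pelInnerLoop (numStr : List Char) (i : Int) (js : List Int) (flag : Bool) : Bool :=
  match js with
  | [] => flag
  | j :: rest =>
    if isSame (PySem.List.slice numStr (some j) (some (j + i))) then true
    else pelInnerLoop numStr i rest flag

def isPelindrom (num : Int) : Bool :=
  let numStr := PySem.Int.toChars num
  let numLen : Int := PySem.List.len numStr
  [(2 : Int), 3].foldl
    (fun flag i => pelInnerLoop numStr i (PySem.List.pyRange 0 (numLen - i + 1) 1) flag) false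

def solution (numbers : List Int) : Int :=
  let x := PySem.List.pyGetD numbers 0 0
  let y := PySem.List.pyGetD numbers 1 0
  (PySem.List.pyRange x (y + 1) 1).foldl
    (fun count num => if isPelindrom num = false then count + 1 else count) 0

-- ===== PORT B =====
-- all(a != b for a, b in zip(s, s[1:])) and all(a != b for a, b in zip(s, s[2:]))
def goodNum (num : Int) : Bool :=
  let s := PySem.Int.toChars num
  ((s.zip (PySem.List.slice s (some 1) none)).all fun p => p.1 ≠ p.2) &&
  ((s.zip (PySem.List.slice s (some 2) none)).all fun p => p.1 ≠ p.2)

-- sum(1 for num in range(x, y+1) if _good(num)) ported as countP over the range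
def solution_alt (numbers : List Int) : Int :=
  let x := PySem.List.pyGetD numbers 0 0
  let y := PySem.List.pyGetD numbers 1 0
  ((PySem.List.pyRange x (y + 1) 1).countP (fun num => goodNum num) : Int)

-- ===== PRECONDITION & SPEC =====
-- A raises IndexError on lists with fewer than two elements; excluded.
def Pre_solution (numbers : List Int) : Prop := 2 ≤ numbers.length
instance (numbers : List Int) : Decidable (Pre_solution numbers) := by unfold Pre_solution; infer_instance
def pvWitness_solution : List Int := [0, 25]

def Spec_solution (numbers : List Int) (out : Int) : Prop := out = solution_alt numbers
instance (numbers : List Int) (out : Int) : Decidable (Spec_solution numbers out) := by unfold Spec_solution; infer_instance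

-- ===== CLAIM (what is proved, stated in full; the proofs are below) =====
def Claim_equal_solution : Prop := ∀ (numbers : List Int), Dom_solution numbers → Pre_solution numbers → Spec_solution numbers (solution numbers)

-- ===== LEMMAS AND PROOFS =====

-- direct characterisations: some adjacent pair equal / some distance-2 pair equal
def hasAdj : List Char → Bool
  | a :: b :: t => (a == b) || hasAdj (b :: t)
  | _ => false

def hasSkip : List Char → Bool
  | a :: b :: c :: t => (a == c) || hasSkip (b :: c :: t)
  | _ => false

lemma isSame_pair (a b : Char) : isSame [a, b] = (a == b) := by
  by_cases h : a = b <;> simp [isSame, isSameLoop, List.range_succ, h]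

lemma isSame_triple (a b c : Char) : isSame [a, b, c] = (a == c) := by
  by_cases h : a = c <;> simp [isSame, isSameLoop, List.range_succ, h]

lemma pelInnerLoop_eq (s : List Char) (i : Int) (js : List Int) (flag : Bool) :
    pelInnerLoop s i js flag
      = (flag || js.any fun j => isSame (PySem.List.slice s (some j) (some (j + i)))) := by
  induction js generalizing flag with
  | nil => simp [pelInnerLoop]
  | cons j rest ih =>
    by_cases h : isSame (PySem.List.slice s (some j) (some (j + i))) = true <;>
      simp [pelInnerLoop, h, ih]

lemma anyAdj_eq (s : List Char) :
    ((List.range (s.length - 1)).any fun k => isSame ((s.drop k).take 2)) = hasAdj s := by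
  induction s with
  | nil => simp [hasAdj]
  | cons a t ih =>
    cases t with
    | nil => simp [hasAdj]
    | cons b u =>
      have : (a :: b :: u).length - 1 = u.length + 1 := by simp
      rw [this, List.range_succ_eq_map]
      simp only [List.any_cons, List.any_map]
      have h0 : isSame (((a :: b :: u).drop 0).take 2) = (a == b) := by
        simp [isSame_pair]
      rw [h0]
      have hrec : ((List.range u.length).any fun k => isSame (((b :: u).drop k).take 2))
          = hasAdj (b :: u) := by
        have := ih
        simpa using this
      have : ((List.range u.length).any fun k => isSame (((a :: b :: u).drop (k + 1)).take 2))
          = hasAdj (b :: u) := by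
        simpa using hrec
      simp only [Function.comp_def, Nat.succ_eq_add_one]
      rw [this]
      simp [hasAdj]

lemma anySkip_eq (s : List Char) :
    ((List.range (s.length - 2)).any fun k => isSame ((s.drop k).take 3)) = hasSkip s := by
  induction s with
  | nil => simp [hasSkip]
  | cons a t ih =>
    cases t with
    | nil => simp [hasSkip]
    | cons b u =>
      cases u with
      | nil => simp [hasSkip]
      | cons c v =>
        have : (a :: b :: c :: v).length - 2 = v.length + 1 := by simp
        rw [this, List.range_succ_eq_map]
        simp only [List.any_cons, List.any_map]
        have h0 : isSame (((a :: b :: c :: v).drop 0).take 3) = (a == c) := by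
          simp [isSame_triple]
        rw [h0]
        have hrec : ((List.range ((b :: c :: v).length - 2)).any
              fun k => isSame (((b :: c :: v).drop k).take 3)) = hasSkip (b :: c :: v) := ih
        have hlen : (b :: c :: v).length - 2 = v.length := by simp
        rw [hlen] at hrec
        have : ((List.range v.length).any
              fun k => isSame (((a :: b :: c :: v).drop (k + 1)).take 3)) = hasSkip (b :: c :: v) := by
          simpa using hrec
        simp only [Function.comp_def, Nat.succ_eq_add_one]
        rw [this]
        simp [hasSkip]

lemma zipAdj_eq (s : List Char) :
    ((s.zip (s.drop 1)).all fun p => p.1 ≠ p.2) = !hasAdj s := by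
  induction s with
  | nil => simp [hasAdj]
  | cons a t ih =>
    cases t with
    | nil => simp [hasAdj]
    | cons b u =>
      simp only [List.drop_succ_cons, List.drop_zero, List.zip_cons_cons, List.all_cons] at *
      by_cases h : a = b <;> simp [hasAdj, h, ← ih]

lemma zipSkip_eq (s : List Char) :
    ((s.zip (s.drop 2)).all fun p => p.1 ≠ p.2) = !hasSkip s := by
  induction s with
  | nil => simp [hasSkip]
  | cons a t ih =>
    cases t with
    | nil => simp [hasSkip]
    | cons b u =>
      cases u with
      | nil => simp [hasSkip]
      | cons c v =>
        simp only [List.drop_succ_cons, List.drop_zero, List.zip_cons_cons, List.all_cons] at *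
        by_cases h : a = c <;> simp [hasSkip, h, ← ih]

-- A-side inner loop for i = 2 / i = 3, rewritten to the drop/take form
lemma sliceA_eq (s : List Char) (i : Nat) :
    ((PySem.List.pyRange 0 (PySem.List.len s - (i : Int) + 1) 1).any
        fun j => isSame (PySem.List.slice s (some j) (some (j + (i : Int)))))
      = ((List.range (s.length + 1 - i)).any fun k => isSame ((s.drop k).take i)) := by
  rw [PySem.List.pyRange_one]
  have hn : ((PySem.List.len s - (i : Int) + 1) - 0).toNat = s.length + 1 - i := by
    simp [PySem.List.len_eq]; omega
  rw [hn, List.any_map]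
  congr 1
  funext k
  simp only [Function.comp_def, zero_add]
  have h1 : ((k : Int) + (i : Int)) = (((k + i : Nat) : Int)) := by push_cast; ring
  rw [h1, PySem.List.slice_natCast]
  simp

lemma isPelindrom_eq (num : Int) :
    isPelindrom num
      = (hasAdj (PySem.Int.toChars num) || hasSkip (PySem.Int.toChars num)) := by
  unfold isPelindrom
  simp only [List.foldl_cons, List.foldl_nil, pelInnerLoop_eq]
  have h2' := sliceA_eq (PySem.Int.toChars num) 2
  have h3' := sliceA_eq (PySem.Int.toChars num) 3
  simp only [Nat.cast_ofNat] at h2' h3'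
  rw [h2', h3']
  have h2 : (PySem.Int.toChars num).length + 1 - 2 = (PySem.Int.toChars num).length - 1 := by omega
  have h3 : (PySem.Int.toChars num).length + 1 - 3 = (PySem.Int.toChars num).length - 2 := by omega
  rw [h2, h3, anyAdj_eq, anySkip_eq]
  simp

lemma goodNum_eq (num : Int) : goodNum num = !isPelindrom num := by
  simp only [goodNum]
  rw [isPelindrom_eq]
  have e1 : PySem.List.slice (PySem.Int.toChars num) (some 1) none = (PySem.Int.toChars num).drop 1 := by
    rw [PySem.List.slice_from _ (by norm_num)]; rfl
  have e2 : PySem.List.slice (PySem.Int.toChars num) (some 2) none = (PySem.Int.toChars num).drop 2 := by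
    rw [PySem.List.slice_from _ (by norm_num)]; rfl
  rw [e1, e2, zipAdj_eq, zipSkip_eq]
  cases hasAdj (PySem.Int.toChars num) <;> cases hasSkip (PySem.Int.toChars num) <;> simp

lemma count_fold (l : List Int) (init : Int) :
    l.foldl (fun count num => if isPelindrom num = false then count + 1 else count) init
      = init + (l.countP fun num => goodNum num : Int) := by
  induction l generalizing init with
  | nil => simp
  | cons x t ih =>
    by_cases h : isPelindrom x = false <;>
      simp [goodNum_eq, h, ih, List.foldl_cons]; ring

-- ===== VERDICT (by name: the statement is the Claim_ definition above) =====
theorem solution_spec : Claim_equal_solution := by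
  intro numbers _ _
  show solution numbers = solution_alt numbers
  unfold solution solution_alt
  rw [count_fold]
  simp
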